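-- pv_equiv track=rewrite | github.com/DannyWeitekamp/error_analysis | error_split.py | find_last_index
-- ===== SOURCE A (Python) =====
-- import copy
--
-- def find_last_index(correct, incorrect):
--     incorrect_copy = copy.deepcopy(incorrect)
--     while (incorrect_copy and (incorrect_copy[0] < correct[0])):
--         incorrect_copy.pop(0)
--
--     res = {}
--     inc, cor = incorrect_copy[::-1], correct[::-1]
--     for i in inc:
--         if(i < cor[0]):
--             while(i < cor[0]):
--                 cor.pop(0)
--             res[i] = cor[0]
--         else:
--             res[i] = cor[0]
--     return(res)
-- ===== SOURCE B (Python) =====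
-- def find_last_index(correct, incorrect):
--     j = 0
--     while j < len(incorrect) and incorrect[j] < correct[0]:
--         j += 1
--     rev_cor = correct[::-1]
--     res = {}
--     p = 0
--     for i in reversed(incorrect[j:]):
--         while i < rev_cor[p]:
--             p += 1
--         res[i] = rev_cor[p]
--     return res
-- ===== Notes on version B (the rewrite author's own statement) =====
-- stated objective: faster
-- what changed: Replaces deepcopy plus repeated list.pop(0) on mutable copies with integer cursors (a skip index j into incorrect and a pointer p into reversed correct), turning the quadratic pop-shifting into a single linear two-pointer walk.
import Mathlib
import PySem

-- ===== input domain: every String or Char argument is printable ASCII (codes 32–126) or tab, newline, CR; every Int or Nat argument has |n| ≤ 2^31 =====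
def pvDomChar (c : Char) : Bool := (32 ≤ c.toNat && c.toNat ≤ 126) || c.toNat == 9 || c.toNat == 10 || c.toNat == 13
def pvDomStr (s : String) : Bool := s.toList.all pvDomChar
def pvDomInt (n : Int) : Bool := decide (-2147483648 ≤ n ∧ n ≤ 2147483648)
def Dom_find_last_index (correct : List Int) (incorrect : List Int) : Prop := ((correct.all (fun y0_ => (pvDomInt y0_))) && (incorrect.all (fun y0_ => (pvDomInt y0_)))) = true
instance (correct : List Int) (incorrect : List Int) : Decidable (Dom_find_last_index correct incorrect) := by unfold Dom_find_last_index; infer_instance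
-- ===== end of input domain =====

-- B replaces A's deepcopy + repeated list.pop(0) with two integer cursors (one linear walk); equivalence is about the return value (A mutates only its own copies).

-- ===== PORT A =====
-- while (incorrect_copy and incorrect_copy[0] < correct[0]): incorrect_copy.pop(0)
def popLoop (c0 : Int) : List Int → List Int
  | [] => []
  | x :: xs => if x < c0 then popLoop c0 xs else x :: xs

-- inner 'while (i < cor[0]): cor.pop(0)'
def popToLE (i : Int) : List Int → List Int
  | [] => []
  | c :: cs => if i < c then popToLE i cs else c :: cs

-- 'for i in inc: …' ; the [] case is Python's IndexError (cor[0] on an empty cor), excluded by Pre_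
def aFor (res : PySem.Dict Int Int) (cor : List Int) : List Int → PySem.Dict Int Int
  | [] => res
  | i :: rest =>
    match popToLE i cor with
    | [] => res
    | c :: cs => aFor (res.insert i c) (c :: cs) rest

def find_last_index (correct : List Int) (incorrect : List Int) : List (Int × Int) :=
  match incorrect with
  | [] => []  -- the while test short-circuits, the for loop runs zero times: res = {}
  | _ :: _ =>
    match correct with
    | [] => []  -- IndexError at correct[0]; excluded by Pre_
    | c0 :: _ =>
      (aFor PySem.Dict.empty correct.reverse ((popLoop c0 incorrect).reverse)).items

-- ===== PORT B =====
-- 'while j < len(incorrect) and incorrect[j] < correct[0]: j += 1'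
def bSkip (inc : List Int) (c0 : Int) (j : Nat) : Nat :=
  if h : j < inc.length ∧ inc.getD j 0 < c0 then bSkip inc c0 (j + 1) else j
  termination_by inc.length - j
  decreasing_by omega

-- 'while i < rev_cor[p]: p += 1' (the bound p < len makes the IndexError path total; it is outside Pre_)
def bAdv (revcor : List Int) (i : Int) (p : Nat) : Nat :=
  if h : p < revcor.length ∧ i < revcor.getD p 0 then bAdv revcor i (p + 1) else p
  termination_by revcor.length - p
  decreasing_by omega

def find_last_index_alt (correct : List Int) (incorrect : List Int) : List (Int × Int) :=
  let j := bSkip incorrect (correct.getD 0 0) 0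
  let revcor := correct.reverse
  (((incorrect.drop j).reverse).foldl
      (fun st i =>
        let p := bAdv revcor i st.1
        (p, st.2.insert i (revcor.getD p 0)))
      ((0 : Nat), (PySem.Dict.empty : PySem.Dict Int Int))).2.items

-- ===== PRECONDITION & SPEC =====
-- Pre_ excludes exactly the inputs on which A raises IndexError: correct[0] with empty correct
-- (and nonempty incorrect), or cor exhausted because some surviving incorrect value is below
-- every element of correct; A returns on every input Pre_ admits.
def Pre_find_last_index (correct : List Int) (incorrect : List Int) : Prop :=
  incorrect = [] ∨ (correct ≠ [] ∧
    ∀ i ∈ incorrect.dropWhile (fun x => decide (x < correct.getD 0 0)), ∃ c ∈ correct, c ≤ i)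
instance (correct : List Int) (incorrect : List Int) : Decidable (Pre_find_last_index correct incorrect) := by unfold Pre_find_last_index; infer_instance

def pvWitness_find_last_index : List Int × List Int := ([1, 3], [0, 2, 4])

def Spec_find_last_index (correct : List Int) (incorrect : List Int) (out : List (Int × Int)) : Prop := out = find_last_index_alt correct incorrect
instance (correct : List Int) (incorrect : List Int) (out : List (Int × Int)) : Decidable (Spec_find_last_index correct incorrect out) := by unfold Spec_find_last_index; infer_instance

-- ===== CLAIM (what is proved, stated in full; the proofs are below) =====
def Claim_equal_find_last_index : Prop := ∀ (correct : List Int) (incorrect : List Int), Dom_find_last_index correct incorrect → Pre_find_last_index correct incorrect → Spec_find_last_index correct incorrect (find_last_index correct incorrect)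

-- ===== LEMMAS AND PROOFS =====

theorem popLoop_eq_dropWhile (c0 : Int) (l : List Int) :
    popLoop c0 l = l.dropWhile (fun x => decide (x < c0)) := by
  induction l with
  | nil => rfl
  | cons x xs ih =>
    simp only [popLoop, List.dropWhile]
    by_cases h : x < c0 <;> simp [h, ih]

theorem skip_drop (inc : List Int) (c0 : Int) (j : Nat) :
    inc.drop (bSkip inc c0 j) = popLoop c0 (inc.drop j) := by
  rw [bSkip]
  split
  · next h =>
    obtain ⟨h1, h2⟩ := h
    rw [skip_drop inc c0 (j + 1)]
    rw [List.drop_eq_getElem_cons h1, popLoop]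
    have hx : inc[j] < c0 := by rwa [List.getD_eq_getElem _ _ h1] at h2
    rw [if_pos hx]
  · next h =>
    by_cases hj : j < inc.length
    · have hx : ¬ inc[j] < c0 := by
        intro hc; exact h ⟨hj, by rwa [List.getD_eq_getElem _ _ hj]⟩
      rw [List.drop_eq_getElem_cons hj, popLoop, if_neg hx]
    · rw [List.drop_eq_nil_of_le (by omega)]
      rfl
  termination_by inc.length - j
  decreasing_by omega

theorem adv_drop (revcor : List Int) (i : Int) (p : Nat) :
    revcor.drop (bAdv revcor i p) = popToLE i (revcor.drop p) := by
  rw [bAdv]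
  split
  · next h =>
    obtain ⟨h1, h2⟩ := h
    rw [adv_drop revcor i (p + 1)]
    rw [List.drop_eq_getElem_cons h1, popToLE]
    have hx : i < revcor[p] := by rwa [List.getD_eq_getElem _ _ h1] at h2
    rw [if_pos hx]
  · next h =>
    by_cases hp : p < revcor.length
    · have hx : ¬ i < revcor[p] := by
        intro hc; exact h ⟨hp, by rwa [List.getD_eq_getElem _ _ hp]⟩
      rw [List.drop_eq_getElem_cons hp, popToLE, if_neg hx]
    · rw [List.drop_eq_nil_of_le (by omega)]
      rfl
  termination_by revcor.length - p
  decreasing_by omega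

theorem adv_le (revcor : List Int) (i : Int) (p q : Nat) (hpq : p ≤ q)
    (hq : q < revcor.length) (hle : revcor.getD q 0 ≤ i) : bAdv revcor i p ≤ q := by
  rw [bAdv]
  split
  · next h =>
    have hne : p ≠ q := by
      intro he; subst he; omega
    exact adv_le revcor i (p + 1) q (by omega) hq hle
  · next h => exact hpq
  termination_by revcor.length - p
  decreasing_by omega

theorem main_fold (revcor : List Int) (q : Nat) (hq : q < revcor.length)
    (l : List Int) (p : Nat) (res : PySem.Dict Int Int) (hpq : p ≤ q)
    (hall : ∀ i ∈ l, revcor.getD q 0 ≤ i) :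
    aFor res (revcor.drop p) l =
      (l.foldl
        (fun st i =>
          let p := bAdv revcor i st.1
          (p, st.2.insert i (revcor.getD p 0)))
        (p, res)).2 := by
  induction l generalizing p res with
  | nil => rfl
  | cons i rest ih =>
    have hi : revcor.getD q 0 ≤ i := hall i (List.mem_cons_self ..)
    have hp' : bAdv revcor i p ≤ q := adv_le revcor i p q hpq hq hi
    have hlt : bAdv revcor i p < revcor.length := by omega
    have hdrop : popToLE i (revcor.drop p) =
        revcor[bAdv revcor i p] :: revcor.drop (bAdv revcor i p + 1) := by
      rw [← adv_drop, List.drop_eq_getElem_cons hlt]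
    simp only [aFor, hdrop, List.foldl_cons]
    have hget : revcor.getD (bAdv revcor i p) 0 = revcor[bAdv revcor i p] :=
      List.getD_eq_getElem _ _ hlt
    rw [← List.drop_eq_getElem_cons hlt]
    rw [ih (bAdv revcor i p) _ hp' (fun x hx => hall x (List.mem_cons_of_mem _ hx))]
    simp [List.getElem?_eq_getElem hlt]

-- ===== VERDICT (by name: the statement is the Claim_ definition above) =====
theorem find_last_index_spec : Claim_equal_find_last_index := by
  intro correct incorrect _hdom hpre
  unfold Spec_find_last_index
  cases incorrect with
  | nil =>
    simp [find_last_index, find_last_index_alt, PySem.Dict.empty]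
  | cons i0 irest =>
    rcases hpre with h | ⟨hne, hall⟩
    · exact absurd h (by simp)
    cases correct with
    | nil => exact absurd rfl hne
    | cons c0 crest =>
      have hgd : (c0 :: crest).getD 0 0 = c0 := rfl
      have hdrop0 : (i0 :: irest).drop (bSkip (i0 :: irest) c0 0) =
          popLoop c0 (i0 :: irest) := skip_drop (i0 :: irest) c0 0
      -- a uniform lower bound: the minimum of correct, located in correct.reverse
      obtain ⟨m, hm⟩ : ∃ m, (c0 :: crest).min? = some m := ⟨_, List.min?_cons⟩
      have hmmem : m ∈ (c0 :: crest) := (List.min?_eq_some_iff.mp hm).1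
      have hmle : ∀ c ∈ (c0 :: crest), m ≤ c := (List.min?_eq_some_iff.mp hm).2
      have hmrev : m ∈ (c0 :: crest).reverse := List.mem_reverse.mpr hmmem
      obtain ⟨q, hq, hqm⟩ := List.getElem_of_mem hmrev
      have hqd : ((c0 :: crest).reverse).getD q 0 = m := by
        rw [List.getD_eq_getElem _ _ hq, hqm]
      have hall' : ∀ i ∈ (popLoop c0 (i0 :: irest)).reverse,
          ((c0 :: crest).reverse).getD q 0 ≤ i := by
        intro i hi
        rw [hqd]
        rw [List.mem_reverse, popLoop_eq_dropWhile] at hi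
        obtain ⟨c, hc, hci⟩ := hall i (by simpa using hi)
        exact le_trans (hmle c hc) hci
      have := main_fold ((c0 :: crest).reverse) q hq
        ((popLoop c0 (i0 :: irest)).reverse) 0 PySem.Dict.empty (Nat.zero_le q) hall'
      simp only [find_last_index, find_last_index_alt, hgd, hdrop0, List.drop_zero] at *
      rw [this]
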